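-- pv_equiv track=rewrite | github.com/anoubhav/LeetCode-Solutions | top_interview_questions/rotate_image.py | swap_leftright_reverse
-- ===== SOURCE A (Python) =====
-- def swap_leftright_reverse(image):
--     n = len(image)
--     # transpose/ swap
--     for i in range(n):
--         for j in range(i):
--             image[i][j], image[j][i] = image[j][i], image[i][j]
--
--     # left-right reverse
--     for i in range(n):
--         for j in range(n//2):
--             image[i][j], image[i][n-j-1] = image[i][n-j-1] , image[i][j]
--     return image
-- ===== SOURCE B (Python) =====
-- def swap_leftright_reverse(image):
--     # Builds the rotated matrix directly (closed-form indexing) instead of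
--     # mutating in place; return-value equivalence only (A mutates its argument).
--     n = len(image)
--     return [[image[n - 1 - j][i] for j in range(n)] for i in range(n)]
-- ===== Notes on version B (the rewrite author's own statement) =====
-- stated objective: simpler
-- what changed: B builds the rotated matrix in one pass with the closed-form index map result[i][j] = image[n-1-j][i] (a nested comprehension) instead of A's two in-place swap passes (transpose then row-reversal); B does not mutate its argument, so the equivalence is about the return value only.
-- outside the precondition, e.g. on swap_leftright_reverse([[1, 2, 3], [4, 5, 6]]): A returns [[4, 1, 3], [5, 2, 6]], B returns [[4, 1], [5, 2]]
import Mathlib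
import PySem

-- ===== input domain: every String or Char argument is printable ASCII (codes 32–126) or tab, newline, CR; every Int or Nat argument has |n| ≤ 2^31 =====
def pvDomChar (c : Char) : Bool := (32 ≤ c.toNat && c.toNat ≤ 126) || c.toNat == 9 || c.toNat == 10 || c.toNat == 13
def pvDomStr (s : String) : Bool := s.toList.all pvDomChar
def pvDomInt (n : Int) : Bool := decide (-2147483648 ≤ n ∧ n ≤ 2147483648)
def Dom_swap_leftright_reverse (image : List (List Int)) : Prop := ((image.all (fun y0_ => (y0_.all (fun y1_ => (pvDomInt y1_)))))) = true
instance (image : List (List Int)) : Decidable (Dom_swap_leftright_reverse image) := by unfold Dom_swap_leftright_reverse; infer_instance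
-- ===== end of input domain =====

-- B replaces A's two in-place swap passes (transpose then left-right row reversal) by a single
-- closed-form construction result[i][j] = image[n-1-j][i]; A mutates its argument, B does not,
-- so the equivalence proved here is about the RETURN value only.


-- ===== PORT A =====
-- image[i] (index always a nonnegative in-range Int under Pre_; the [] / 0 defaults are unreachable there)
def rowOf (m : List (List Int)) (i : Int) : List Int := (PySem.List.pyGet? m i).getD []
def cellAt (m : List (List Int)) (i j : Int) : Int := (PySem.List.pyGet? (rowOf m i) j).getD 0
def setCell (m : List (List Int)) (i j : Int) (v : Int) : List (List Int) :=
  m.set i.toNat ((rowOf m i).set j.toNat v)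
-- 'image[a][b], image[a'][b'] = image[a'][b'], image[a][b]': RHS read first, then the two stores in order
def swap2 (m : List (List Int)) (a b a' b' : Int) : List (List Int) :=
  let x := cellAt m a' b'
  let y := cellAt m a b
  setCell (setCell m a b x) a' b' y

def swap_leftright_reverse (image : List (List Int)) : List (List Int) :=
  let n : Int := (image.length : Int)
  let m1 := (PySem.List.pyRange 0 n 1).foldl (fun m i =>
      (PySem.List.pyRange 0 i 1).foldl (fun m j => swap2 m i j j i) m) image
  let m2 := (PySem.List.pyRange 0 n 1).foldl (fun m i =>
      (PySem.List.pyRange 0 (PySem.Int.floordiv n 2) 1).foldl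
        (fun m j => swap2 m i j i (n - j - 1)) m) m1
  m2

-- ===== PORT B =====
def swap_leftright_reverse_alt (image : List (List Int)) : List (List Int) :=
  let n : Int := (image.length : Int)
  (PySem.List.pyRange 0 n 1).map (fun i =>
    (PySem.List.pyRange 0 n 1).map (fun j => cellAt image (n - 1 - j) i))

-- ===== PRECONDITION & SPEC =====
-- Pre_ excludes non-square inputs: on those rotation is undefined — A raises IndexError when a row
-- is too short, and when rows are longer than n it returns a partially-swapped ragged artefact of
-- its in-place passes that is not a rotation of anything.
def Pre_swap_leftright_reverse (image : List (List Int)) : Prop :=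
  ∀ row ∈ image, row.length = image.length
instance (image : List (List Int)) : Decidable (Pre_swap_leftright_reverse image) := by
  unfold Pre_swap_leftright_reverse; infer_instance

def pvWitness_swap_leftright_reverse : List (List Int) := [[1, 2], [3, 4]]

def Spec_swap_leftright_reverse (image : List (List Int)) (out : List (List Int)) : Prop := out = swap_leftright_reverse_alt image
instance (image : List (List Int)) (out : List (List Int)) : Decidable (Spec_swap_leftright_reverse image out) := by unfold Spec_swap_leftright_reverse; infer_instance

-- ===== CLAIM (what is proved, stated in full; the proofs are below) =====
def Claim_equal_swap_leftright_reverse : Prop := ∀ (image : List (List Int)), Dom_swap_leftright_reverse image → Pre_swap_leftright_reverse image → Spec_swap_leftright_reverse image (swap_leftright_reverse image)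

-- ===== LEMMAS AND PROOFS =====

-- Nat-indexed cell reader used throughout the proofs.
def gN (m : List (List Int)) (r c : Nat) : Int := ((m[r]?.getD [])[c]?.getD 0)

def Shape (m : List (List Int)) (n : Nat) : Prop :=
  m.length = n ∧ ∀ row ∈ m, row.length = n

theorem shape_row {m : List (List Int)} {n r : Nat} (h : Shape m n) (hr : r < n) :
    (m[r]?.getD []).length = n := by
  obtain ⟨hl, hrow⟩ := h
  have hrm : r < m.length := by omega
  rw [List.getElem?_eq_getElem hrm]
  exact hrow _ (List.getElem_mem hrm)

theorem cellAt_natCast (m : List (List Int)) (a b : Nat) : cellAt m (a : Int) (b : Int) = gN m a b := by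
  simp [cellAt, rowOf, gN]

theorem setCell_natCast (m : List (List Int)) (a b : Nat) (v : Int) :
    setCell m (a : Int) (b : Int) v = m.set a ((m[a]?.getD []).set b v) := by
  simp [setCell, rowOf]

theorem shape_setCell {m : List (List Int)} {n : Nat} (h : Shape m n) {a : Nat} (b : Nat)
    (ha : a < n) (v : Int) : Shape (setCell m (a : Int) (b : Int) v) n := by
  rw [setCell_natCast]
  obtain ⟨hl, hrow⟩ := h
  refine ⟨by simpa using hl, ?_⟩
  intro row hmem
  rcases List.mem_or_eq_of_mem_set hmem with h' | h'
  · exact hrow _ h'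
  · subst h'
    have ham : a < m.length := by omega
    rw [List.getElem?_eq_getElem ham]
    simpa using hrow _ (List.getElem_mem ham)

theorem gN_setCell {m : List (List Int)} {n : Nat} (h : Shape m n) {a b : Nat}
    (ha : a < n) (hb : b < n) (v : Int) (r c : Nat) :
    gN (setCell m (a : Int) (b : Int) v) r c = if r = a ∧ c = b then v else gN m r c := by
  rw [setCell_natCast]
  have ham : a < m.length := h.1 ▸ ha
  have hrowlen : (m[a]?.getD []).length = n := shape_row h ha
  unfold gN
  by_cases hr : r = a
  · subst hr
    rw [List.getElem?_set_self ham, Option.getD_some, List.getElem?_set]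
    by_cases hc : c = b
    · subst hc
      simp [hrowlen, hb]
    · simp [hc, Ne.symm hc]
  · rw [List.getElem?_set_ne (Ne.symm hr)]
    simp [hr]

theorem shape_swap2 {m : List (List Int)} {n : Nat} (h : Shape m n) {a a' : Nat} (b b' : Nat)
    (ha : a < n) (ha' : a' < n) :
    Shape (swap2 m (a : Int) (b : Int) (a' : Int) (b' : Int)) n := by
  simp only [swap2]
  exact shape_setCell (shape_setCell h b ha _) b' ha' _

theorem gN_swap2 {m : List (List Int)} {n : Nat} (h : Shape m n) {a b a' b' : Nat}
    (ha : a < n) (hb : b < n) (ha' : a' < n) (hb' : b' < n) (r c : Nat) :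
    gN (swap2 m (a : Int) (b : Int) (a' : Int) (b' : Int)) r c =
      if r = a' ∧ c = b' then gN m a b
      else if r = a ∧ c = b then gN m a' b' else gN m r c := by
  simp only [swap2]
  rw [cellAt_natCast, cellAt_natCast,
      gN_setCell (shape_setCell h b ha _) ha' hb',
      gN_setCell h ha hb]


-- Phase 1 (transpose pass), inner loop over j < J for a fixed outer row I.
theorem phase1_inner (orig m0 : List (List Int)) (n I : Nat) (hI : I < n)
    (h0 : Shape m0 n)
    (hspec : ∀ r c, r < n → c < n → gN m0 r c =
      if max r c < I then gN orig c r else gN orig r c) :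
    ∀ J, J ≤ I →
      Shape ((PySem.List.pyRange 0 (J : Int) 1).foldl
        (fun m j => swap2 m (I : Int) j j (I : Int)) m0) n ∧
      ∀ r c, r < n → c < n →
        gN ((PySem.List.pyRange 0 (J : Int) 1).foldl
          (fun m j => swap2 m (I : Int) j j (I : Int)) m0) r c =
          if max r c < I ∨ (r = I ∧ c < J) ∨ (c = I ∧ r < J)
          then gN orig c r else gN orig r c := by
  intro J
  induction J with
  | zero =>
    intro _
    have hnil : PySem.List.pyRange 0 ((0 : Nat) : Int) 1 = [] :=
      PySem.List.pyRange_one_eq_nil (by simp)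
    rw [hnil, List.foldl_nil]
    refine ⟨h0, ?_⟩
    intro r c hr hc
    rw [hspec r c hr hc]
    by_cases hA : max r c < I
    · rw [if_pos hA, if_pos (Or.inl hA)]
    · rw [if_neg hA, if_neg (by omega)]
  | succ J ih =>
    intro hJ
    have hJ' : J ≤ I := by omega
    have hJn : J < n := by omega
    obtain ⟨hsh, hsp⟩ := ih hJ'
    have hcast : ((J + 1 : Nat) : Int) = (J : Int) + 1 := by push_cast; ring
    rw [hcast, PySem.List.pyRange_one_succ_right (by positivity), List.foldl_append,
        List.foldl_cons, List.foldl_nil]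
    refine ⟨shape_swap2 hsh J I hI hJn, ?_⟩
    intro r c hr hc
    rw [gN_swap2 hsh hI hJn hJn hI r c]
    by_cases h1 : r = J ∧ c = I
    · rw [h1.1, h1.2, if_pos ⟨rfl, rfl⟩, hsp I J hI hJn, if_neg (by omega), if_pos (by omega)]
    · rw [if_neg h1]
      by_cases h2 : r = I ∧ c = J
      · rw [h2.1, h2.2, if_pos ⟨rfl, rfl⟩, hsp J I hJn hI, if_neg (by omega), if_pos (by omega)]
      · rw [if_neg h2, hsp r c hr hc]
        by_cases hA : max r c < I ∨ (r = I ∧ c < J) ∨ (c = I ∧ r < J)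
        · rw [if_pos hA, if_pos (by omega)]
        · rw [if_neg hA, if_neg (by omega)]

-- Phase 1, outer loop over i < I.
theorem phase1_outer (orig : List (List Int)) (n : Nat) (h0 : Shape orig n) :
    ∀ I, I ≤ n →
      Shape ((PySem.List.pyRange 0 (I : Int) 1).foldl (fun m i =>
        (PySem.List.pyRange 0 i 1).foldl (fun m j => swap2 m i j j i) m) orig) n ∧
      ∀ r c, r < n → c < n →
        gN ((PySem.List.pyRange 0 (I : Int) 1).foldl (fun m i =>
          (PySem.List.pyRange 0 i 1).foldl (fun m j => swap2 m i j j i) m) orig) r c =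
          if max r c < I then gN orig c r else gN orig r c := by
  intro I
  induction I with
  | zero =>
    intro _
    have hnil : PySem.List.pyRange 0 ((0 : Nat) : Int) 1 = [] :=
      PySem.List.pyRange_one_eq_nil (by simp)
    rw [hnil, List.foldl_nil]
    refine ⟨h0, ?_⟩
    intro r c hr hc
    rw [if_neg (by omega)]
  | succ I ih =>
    intro hI
    have hI' : I ≤ n := by omega
    have hIn : I < n := by omega
    obtain ⟨hsh, hsp⟩ := ih hI'
    have hcast : ((I + 1 : Nat) : Int) = (I : Int) + 1 := by push_cast; ring
    rw [hcast, PySem.List.pyRange_one_succ_right (by positivity), List.foldl_append,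
        List.foldl_cons, List.foldl_nil]
    obtain ⟨hsh', hsp'⟩ := phase1_inner orig _ n I hIn hsh hsp I (le_refl I)
    refine ⟨hsh', ?_⟩
    intro r c hr hc
    rw [hsp' r c hr hc]
    by_cases h1 : r = I ∧ c = I
    · rw [h1.1, h1.2, if_neg (by omega), if_pos (by omega)]
    · by_cases hA : max r c < I ∨ (r = I ∧ c < I) ∨ (c = I ∧ r < I)
      · rw [if_pos hA, if_pos (by omega)]
      · rw [if_neg hA, if_neg (by omega)]

-- Phase 2 (row-reversal pass), inner loop over j < J ≤ n/2 for a fixed row I.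
theorem phase2_inner (base m0 : List (List Int)) (n I : Nat) (hI : I < n)
    (h0 : Shape m0 n)
    (hspec : ∀ r c, r < n → c < n → gN m0 r c =
      if r < I then gN base r (n - 1 - c) else gN base r c) :
    ∀ J, J ≤ n / 2 →
      Shape ((PySem.List.pyRange 0 (J : Int) 1).foldl
        (fun m j => swap2 m (I : Int) j (I : Int) ((n : Int) - j - 1)) m0) n ∧
      ∀ r c, r < n → c < n →
        gN ((PySem.List.pyRange 0 (J : Int) 1).foldl
          (fun m j => swap2 m (I : Int) j (I : Int) ((n : Int) - j - 1)) m0) r c =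
          if r < I ∨ (r = I ∧ (c < J ∨ n - J ≤ c))
          then gN base r (n - 1 - c) else gN base r c := by
  intro J
  induction J with
  | zero =>
    intro _
    have hnil : PySem.List.pyRange 0 ((0 : Nat) : Int) 1 = [] :=
      PySem.List.pyRange_one_eq_nil (by simp)
    rw [hnil, List.foldl_nil]
    refine ⟨h0, ?_⟩
    intro r c hr hc
    rw [hspec r c hr hc]
    by_cases hA : r < I
    · rw [if_pos hA, if_pos (Or.inl hA)]
    · rw [if_neg hA, if_neg (by omega)]
  | succ J ih =>
    intro hJ
    have hJ' : J ≤ n / 2 := by omega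
    have hJn : J < n := by omega
    have h2J : 2 * J + 1 < n := by omega
    obtain ⟨hsh, hsp⟩ := ih hJ'
    have hcast : ((J + 1 : Nat) : Int) = (J : Int) + 1 := by push_cast; ring
    rw [hcast, PySem.List.pyRange_one_succ_right (by positivity), List.foldl_append,
        List.foldl_cons, List.foldl_nil]
    have hbcast : (n : Int) - (J : Int) - 1 = ((n - 1 - J : Nat) : Int) := by omega
    rw [hbcast]
    have hbn : n - 1 - J < n := by omega
    refine ⟨shape_swap2 hsh J (n - 1 - J) hI hI, ?_⟩
    intro r c hr hc
    rw [gN_swap2 hsh hI hJn hI hbn r c]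
    by_cases h1 : r = I ∧ c = n - 1 - J
    · rw [h1.1, h1.2, if_pos ⟨rfl, rfl⟩, hsp I J hI hJn, if_neg (by omega), if_pos (by omega)]
      congr 1
      omega
    · rw [if_neg h1]
      by_cases h2 : r = I ∧ c = J
      · rw [h2.1, h2.2, if_pos ⟨rfl, rfl⟩, hsp I (n - 1 - J) hI hbn, if_neg (by omega),
            if_pos (by omega)]
      · rw [if_neg h2, hsp r c hr hc]
        by_cases hA : r < I ∨ (r = I ∧ (c < J ∨ n - J ≤ c))
        · rw [if_pos hA, if_pos (by omega)]
        · rw [if_neg hA, if_neg (by omega)]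

-- Phase 2, outer loop over i < I.
theorem phase2_outer (base : List (List Int)) (n : Nat) (h0 : Shape base n) :
    ∀ I, I ≤ n →
      Shape ((PySem.List.pyRange 0 (I : Int) 1).foldl (fun m i =>
        (PySem.List.pyRange 0 ((n / 2 : Nat) : Int) 1).foldl
          (fun m j => swap2 m i j i ((n : Int) - j - 1)) m) base) n ∧
      ∀ r c, r < n → c < n →
        gN ((PySem.List.pyRange 0 (I : Int) 1).foldl (fun m i =>
          (PySem.List.pyRange 0 ((n / 2 : Nat) : Int) 1).foldl
            (fun m j => swap2 m i j i ((n : Int) - j - 1)) m) base) r c =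
          if r < I then gN base r (n - 1 - c) else gN base r c := by
  intro I
  induction I with
  | zero =>
    intro _
    have hnil : PySem.List.pyRange 0 ((0 : Nat) : Int) 1 = [] :=
      PySem.List.pyRange_one_eq_nil (by simp)
    rw [hnil, List.foldl_nil]
    refine ⟨h0, ?_⟩
    intro r c hr hc
    rw [if_neg (by omega)]
  | succ I ih =>
    intro hI
    have hI' : I ≤ n := by omega
    have hIn : I < n := by omega
    obtain ⟨hsh, hsp⟩ := ih hI'
    have hcast : ((I + 1 : Nat) : Int) = (I : Int) + 1 := by push_cast; ring
    rw [hcast, PySem.List.pyRange_one_succ_right (by positivity), List.foldl_append,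
        List.foldl_cons, List.foldl_nil]
    obtain ⟨hsh', hsp'⟩ := phase2_inner base _ n I hIn hsh hsp (n / 2) (le_refl _)
    refine ⟨hsh', ?_⟩
    intro r c hr hc
    rw [hsp' r c hr hc]
    by_cases h1 : r = I ∧ n / 2 ≤ c ∧ c < n - n / 2
    · have hmid : n - 1 - c = c := by omega
      rw [if_neg (by omega), if_pos (by omega), hmid]
    · by_cases hA : r < I ∨ (r = I ∧ (c < n / 2 ∨ n - n / 2 ≤ c))
      · rw [if_pos hA, if_pos (by omega)]
      · rw [if_neg hA, if_neg (by omega)]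


-- Entry (r,c) of a matrix via getElem, bridged to gN.
theorem gN_eq_getElem (m : List (List Int)) (r c : Nat) (h1 : r < m.length)
    (h2 : c < (m[r]'h1).length) : gN m r c = (m[r]'h1)[c]'h2 := by
  unfold gN
  rw [List.getElem?_eq_getElem h1, Option.getD_some, List.getElem?_eq_getElem h2,
      Option.getD_some]

-- ===== VERDICT (by name: the statement is the Claim_ definition above) =====
theorem swap_leftright_reverse_spec : Claim_equal_swap_leftright_reverse := by
  intro image _dom hpre
  unfold Spec_swap_leftright_reverse
  set n := image.length with hn
  have hsq : Shape image n := ⟨rfl, hpre⟩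
  have hfd : PySem.Int.floordiv (n : Int) 2 = ((n / 2 : Nat) : Int) := by
    exact_mod_cast PySem.Int.floordiv_natCast n 2
  set M1 := (PySem.List.pyRange 0 (n : Int) 1).foldl (fun m i =>
    (PySem.List.pyRange 0 i 1).foldl (fun m j => swap2 m i j j i) m) image with hM1
  set M2 := (PySem.List.pyRange 0 (n : Int) 1).foldl (fun m i =>
    (PySem.List.pyRange 0 ((n / 2 : Nat) : Int) 1).foldl
      (fun m j => swap2 m i j i ((n : Int) - j - 1)) m) M1 with hM2
  obtain ⟨hsh1, hsp1⟩ := phase1_outer image n hsq n (le_refl n)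
  obtain ⟨hsh2, hsp2⟩ := phase2_outer M1 n hsh1 n (le_refl n)
  have hval : ∀ r c, r < n → c < n → gN M2 r c = gN image (n - 1 - c) r := by
    intro r c hr hc
    rw [hsp2 r c hr hc, if_pos hr, hsp1 r (n - 1 - c) hr (by omega), if_pos (by omega)]
  have hAeq : swap_leftright_reverse image = M2 := by
    rw [hM2, hM1]
    simp only [swap_leftright_reverse]
    rw [hfd]
  have hlen2 : M2.length = n := hsh2.1
  rw [hAeq]
  apply List.ext_getElem
  · rw [hlen2]
    simp only [swap_leftright_reverse_alt, List.length_map, PySem.List.length_pyRange_one]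
    omega
  · intro r h1 h2
    have hr : r < n := by omega
    have hrowlen : (M2[r]'h1).length = n := hsh2.2 _ (List.getElem_mem h1)
    apply List.ext_getElem
    · rw [hrowlen]
      simp only [swap_leftright_reverse_alt, List.getElem_map, List.length_map,
        PySem.List.length_pyRange_one]
      omega
    · intro c h3 h4
      have hc : c < n := by omega
      rw [← gN_eq_getElem M2 r c h1 h3, hval r c hr hc]
      simp only [swap_leftright_reverse_alt, List.getElem_map, PySem.List.getElem_pyRange_one]
      have hcast : (n : Int) - 1 - (0 + (c : Int)) = ((n - 1 - c : Nat) : Int) := by omega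
      have hcast2 : (0 : Int) + (r : Int) = ((r : Nat) : Int) := by omega
      rw [hcast, hcast2, cellAt_natCast]
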